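-- pv_equiv track=rewrite | github.com/dibi73/ha-bookstack-sync | custom_components/bookstack_sync/extractor.py | _resolve_group_members
-- ===== SOURCE A (Python) =====
-- def _resolve_group_members(
--     group_id: str,
--     group_map: dict[str, list[str]],
--     _seen: set[str] | None = None,
-- ) -> set[str]:
--     """
--     Resolve a group recursively to the set of leaf (non-group) members.
--
--     Cycle-safe: ``_seen`` tracks visited group_ids so a group that
--     contains itself (or any cycle through nested groups) terminates
--     rather than recursing forever.
--     """
--     seen = _seen if _seen is not None else set()
--     if group_id in seen:
--         return set()
--     seen = seen | {group_id}
--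
--     leaves: set[str] = set()
--     for member in group_map.get(group_id, ()):
--         if member in group_map:
--             leaves |= _resolve_group_members(member, group_map, seen)
--         else:
--             leaves.add(member)
--     return leaves
-- ===== SOURCE B (Python) =====
-- def _resolve_group_members(
--     group_id: str,
--     group_map: dict[str, list[str]],
--     _seen: set[str] | None = None,
-- ) -> set[str]:
--     """Explicit-stack iterative DFS: frames of (group_id, remaining members),
--     one shared visited set (add on push, discard when a frame is exhausted)
--     and one shared leaves accumulator; no per-level set copies or unions."""
--     visited = set(_seen) if _seen is not None else set()
--     leaves: set[str] = set()
--     if group_id in visited: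
--         return leaves
--     visited.add(group_id)
--     stack = [(group_id, list(group_map.get(group_id, ())))]
--     while stack:
--         gid, members = stack.pop()
--         if not members:
--             visited.discard(gid)
--             continue
--         m = members[0]
--         stack.append((gid, members[1:]))
--         if m not in group_map:
--             leaves.add(m)
--         elif m not in visited:
--             visited.add(m)
--             stack.append((m, list(group_map[m])))
--     return leaves
-- ===== Notes on version B (the rewrite author's own statement) =====
-- stated objective: alternative
-- what changed: A is a recursive DFS that copies the seen-set at every level (seen | {group_id}) and unions per-branch result sets; B is an iterative explicit-stack DFS over (group, remaining-members) frames with one shared visited set (add on push, discard on frame exhaustion) and one shared leaves accumulator, so no set is ever copied or unioned.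
import Mathlib
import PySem

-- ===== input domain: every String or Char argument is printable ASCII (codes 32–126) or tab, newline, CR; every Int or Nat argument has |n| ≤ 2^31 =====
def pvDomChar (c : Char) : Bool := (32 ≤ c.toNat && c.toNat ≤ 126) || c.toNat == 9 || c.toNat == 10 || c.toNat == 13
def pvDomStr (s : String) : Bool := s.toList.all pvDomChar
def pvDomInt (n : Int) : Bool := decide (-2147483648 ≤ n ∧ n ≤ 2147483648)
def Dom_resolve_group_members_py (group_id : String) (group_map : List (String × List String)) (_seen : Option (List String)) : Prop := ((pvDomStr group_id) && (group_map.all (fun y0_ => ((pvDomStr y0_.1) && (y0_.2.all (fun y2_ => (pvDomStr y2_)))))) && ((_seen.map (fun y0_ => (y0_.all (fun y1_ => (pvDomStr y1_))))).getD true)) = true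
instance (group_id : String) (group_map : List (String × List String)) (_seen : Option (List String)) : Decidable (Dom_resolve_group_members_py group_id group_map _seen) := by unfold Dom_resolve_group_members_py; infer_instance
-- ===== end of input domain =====

-- B replaces A's recursive DFS with seen-set copies (`seen | {group_id}` at every
-- level) and per-branch set unions by an iterative explicit-stack DFS over
-- (group, remaining-members) frames with one shared visited set (add on push,
-- discard when a frame is exhausted) and one shared leaves accumulator.
-- A's recursion carries depth fuel |group_map|+2 (cycle-safety makes deeper
-- recursion unreachable); B's loop carries step fuel pvCost (unreachable too).

-- ===== PORT A =====
def pvResolveA (fuel : Nat) (group_id : String) (group_map : List (String × List String)) (seen : PySem.Set String) : PySem.Set String :=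
  match fuel with
  | 0 => PySem.Set.empty
  | fuel + 1 =>
    if PySem.Set.contains seen group_id then PySem.Set.empty
    else
      let seen' := PySem.Set.union seen (PySem.Set.ofList [group_id])
      (PySem.Dict.getD (PySem.Dict.mk group_map) group_id []).foldl
        (fun leaves member =>
          if PySem.Dict.contains (PySem.Dict.mk group_map) member then
            PySem.Set.union leaves (pvResolveA fuel member group_map seen')
          else
            PySem.Set.add leaves member)
        PySem.Set.empty

def resolve_group_members_py (group_id : String) (group_map : List (String × List String)) (_seen : Option (List String)) : List String :=
  let seen : PySem.Set String := match _seen with | some s => s | none => PySem.Set.empty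
  pvResolveA (group_map.length + 2) group_id group_map seen

-- ===== PORT B =====
-- the while-loop of Source B: state = (stack of frames, visited, leaves)
def pvLoopB (gm : List (String × List String)) : Nat → List (String × List String) → PySem.Set String → PySem.Set String → PySem.Set String
  | 0, _, _, leaves => leaves
  | _ + 1, [], _, leaves => leaves
  | fuel + 1, (gid, members) :: rest, visited, leaves =>
    match members with
    | [] => pvLoopB gm fuel rest (PySem.Set.discard visited gid) leaves
    | m :: ms =>
      if !(PySem.Dict.contains (PySem.Dict.mk gm) m) then
        pvLoopB gm fuel ((gid, ms) :: rest) visited (PySem.Set.add leaves m)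
      else if !(PySem.Set.contains visited m) then
        pvLoopB gm fuel ((m, PySem.Dict.getD (PySem.Dict.mk gm) m []) :: (gid, ms) :: rest)
          (PySem.Set.add visited m) leaves
      else
        pvLoopB gm fuel ((gid, ms) :: rest) visited leaves

def resolve_group_members_py_alt (group_id : String) (group_map : List (String × List String)) (_seen : Option (List String)) : List String :=
  let visited : PySem.Set String := match _seen with | some s => PySem.Set.ofList s | none => PySem.Set.empty
  if PySem.Set.contains visited group_id then PySem.Set.empty
  else
    -- step-count fuel: the loop is cycle-safe, so (e+2)^(depth bound) steps
    -- always suffice (proved below); the fuel-out branch is unreachable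
    let e := (group_map.map (fun p => p.2.length)).sum
    pvLoopB group_map ((e + 2) ^ (group_map.length + 2))
      [(group_id, PySem.Dict.getD (PySem.Dict.mk group_map) group_id [])]
      (PySem.Set.add visited group_id) PySem.Set.empty

-- ===== PRECONDITION & SPEC =====
def Spec_resolve_group_members_py (group_id : String) (group_map : List (String × List String)) (_seen : Option (List String)) (out : List String) : Prop := out = resolve_group_members_py_alt group_id group_map _seen
instance (group_id : String) (group_map : List (String × List String)) (_seen : Option (List String)) (out : List String) : Decidable (Spec_resolve_group_members_py group_id group_map _seen out) := by unfold Spec_resolve_group_members_py; infer_instance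

-- ===== CLAIM (what is proved, stated in full; the proofs are below) =====
def Claim_equal_resolve_group_members_py : Prop := ∀ (group_id : String) (group_map : List (String × List String)) (_seen : Option (List String)), Dom_resolve_group_members_py group_id group_map _seen → Spec_resolve_group_members_py group_id group_map _seen (resolve_group_members_py group_id group_map _seen)

-- ===== LEMMAS AND PROOFS =====

-- set-algebra facts about PySem.Set used to relate A's per-branch unions to
-- B's single threaded accumulator
lemma pv_union_eq_foldl (s t : List String) :
    PySem.Set.union s t = t.foldl PySem.Set.add s := rfl

lemma pv_union_append_singleton (s t : List String) (x : String) :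
    PySem.Set.union s (t ++ [x]) = PySem.Set.add (PySem.Set.union s t) x := by
  rw [pv_union_eq_foldl, List.foldl_append, ← pv_union_eq_foldl]
  rfl

lemma pv_union_add (a t : List String) (x : String) :
    PySem.Set.union a (PySem.Set.add t x) = PySem.Set.add (PySem.Set.union a t) x := by
  by_cases hx : x ∈ t
  · rw [PySem.Set.add_of_mem hx, PySem.Set.add_of_mem]
    exact (PySem.Set.mem_union _ _ _).mpr (Or.inr hx)
  · rw [PySem.Set.add_of_not_mem hx, pv_union_append_singleton]

lemma pv_union_assoc (a b c : List String) :
    PySem.Set.union (PySem.Set.union a b) c = PySem.Set.union a (PySem.Set.union b c) := by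
  induction c using List.reverseRecOn with
  | nil => rfl
  | append_singleton c x ih =>
    rw [pv_union_append_singleton, pv_union_append_singleton, ih, pv_union_add]

-- the leaves accumulator of A stays Nodup through the member loop
lemma pv_nodup_fold (gm : List (String × List String)) (f : String → List String)
    (ms : List String) (acc : List String) (hacc : acc.Nodup) :
    (ms.foldl (fun leaves member =>
        if PySem.Dict.contains (PySem.Dict.mk gm) member then
          PySem.Set.union leaves (f member)
        else PySem.Set.add leaves member) acc).Nodup := by
  induction ms generalizing acc with
  | nil => exact hacc
  | cons m ms ih =>
    simp only [List.foldl_cons]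
    split
    · exact ih _ (PySem.Set.nodup_union _ _ hacc)
    · exact ih _ (PySem.Set.nodup_add _ _ hacc)

-- discarding a freshly added element restores the visited set
lemma pv_discard_add (vis : PySem.Set String) (x : String) (hx : x ∉ vis) :
    PySem.Set.discard (PySem.Set.add vis x) x = vis := by
  rw [PySem.Set.add_of_not_mem hx]
  show (vis ++ [x]).filter _ = vis
  rw [List.filter_append]
  have h1 : vis.filter (fun y => !(y == x)) = vis :=
    List.filter_eq_self.mpr (fun y hy => by
      simp only [Bool.not_eq_eq_eq_not, Bool.not_true, beq_eq_false_iff_ne]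
      exact fun hh => hx (hh ▸ hy))
  have h2 : [x].filter (fun y => !(y == x)) = [] := by simp
  rw [h1, h2, List.append_nil]

-- an empty stack returns the leaves for any fuel
lemma pv_loopB_nil (gm : List (String × List String)) (f : Nat) (vis L : PySem.Set String) :
    pvLoopB gm f [] vis L = L := by
  cases f <;> rfl

-- number of distinct keys of gm not yet visited — the depth measure
def pvKeysLeft (gm : List (String × List String)) (vis : PySem.Set String) : Nat :=
  ((PySem.List.dedup (gm.map Prod.fst)).filter (fun k => !(PySem.Set.contains vis k))).length

lemma pv_keysLeft_le (gm : List (String × List String)) (vis : PySem.Set String) :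
    pvKeysLeft gm vis ≤ gm.length := by
  unfold pvKeysLeft
  calc _ ≤ (PySem.List.dedup (gm.map Prod.fst)).length := List.length_filter_le _ _
    _ ≤ (gm.map Prod.fst).length := by
        rw [PySem.List.dedup_eq_ofList]; exact PySem.Set.length_ofList_le _
    _ = gm.length := List.length_map ..

lemma pv_keysLeft_lt (gm : List (String × List String)) (vis : PySem.Set String) (m : String)
    (hk : PySem.Dict.contains (PySem.Dict.mk gm) m = true) (hv : m ∉ vis) :
    pvKeysLeft gm (PySem.Set.add vis m) < pvKeysLeft gm vis := by
  unfold pvKeysLeft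
  set l := PySem.List.dedup (gm.map Prod.fst) with hl
  have hnodup : l.Nodup := PySem.List.nodup_dedup _
  have hml : m ∈ l := by
    rw [hl, PySem.List.mem_dedup]
    rcases List.any_eq_true.mp hk with ⟨p, hp, hpm⟩
    exact List.mem_map.mpr ⟨p, hp, by simpa using hpm⟩
  have hpred : ∀ k, (!(PySem.Set.contains (PySem.Set.add vis m) k)) =
      ((!(k == m)) && !(PySem.Set.contains vis k)) := by
    intro k
    by_cases hk' : k = m
    · subst hk'; simp [PySem.Set.mem_add]
    · by_cases hv2 : k ∈ vis
      · simp [PySem.Set.mem_add, hk', hv2]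
      · simp [PySem.Set.mem_add, hk', hv2]
  have h1 : l.filter (fun k => !(PySem.Set.contains (PySem.Set.add vis m) k)) =
      (l.filter (fun k => !(PySem.Set.contains vis k))).filter (fun k => !(k == m)) := by
    rw [List.filter_filter]
    exact List.filter_congr (fun k _ => hpred k)
  set lo := l.filter (fun k => !(PySem.Set.contains vis k)) with hlo
  have hmlo : m ∈ lo := by
    rw [hlo]
    refine List.mem_filter.mpr ⟨hml, ?_⟩
    simp [hv]
  have hnlo : lo.Nodup := hnodup.filter _
  have h2 : (lo.filter (fun k => !(k == m))).length = lo.length - 1 := by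
    have he := hnlo.erase_eq_filter m
    have : lo.filter (fun k => !(k == m)) = lo.filter (fun x => x != m) := rfl
    rw [this, ← he, List.length_erase_of_mem hmlo]
  have hpos : 0 < lo.length := List.length_pos_of_mem hmlo
  rw [h1, h2]
  omega

-- each value list of gm is no longer than the total entry count
lemma pv_getD_len_le (gm : List (String × List String)) (m : String) :
    (PySem.Dict.getD (PySem.Dict.mk gm) m []).length ≤ (gm.map (fun p => p.2.length)).sum := by
  show ((Option.map (fun x => x.2) (List.find? (fun p => p.1 == m) gm)).getD []).length ≤ _
  cases hf : List.find? (fun p => p.1 == m) gm with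
  | none => simp
  | some p =>
    have hp : p ∈ gm := List.mem_of_find?_eq_some hf
    have : p.2.length ∈ gm.map (fun p => p.2.length) := List.mem_map.mpr ⟨p, hp, rfl⟩
    simpa using List.le_sum_of_mem this

-- proof-side step-count: pvCost e fuelA l bounds the number of loop iterations
-- needed to exhaust a frame with l remaining members when every member list has
-- length ≤ e and nesting depth is bounded by fuelA
def pvCost (e : Nat) : Nat → Nat → Nat
  | _, 0 => 1
  | 0, l + 1 => 1 + pvCost e 0 l
  | fA + 1, l + 1 => 1 + pvCost e fA e + pvCost e (fA + 1) l
  termination_by fA l => (fA, l)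

lemma pv_cost_step (e fA l : Nat) : pvCost e fA l ≤ pvCost e fA (l + 1) := by
  cases fA
  all_goals simp [pvCost]

lemma pv_cost_mono (e fA : Nat) {l l' : Nat} (h : l ≤ l') : pvCost e fA l ≤ pvCost e fA l' := by
  induction h with
  | refl => exact le_rfl
  | step _ ih => exact le_trans ih (pv_cost_step e fA _)

lemma pv_cost_pos (e fA l : Nat) : 1 ≤ pvCost e fA l := by
  cases fA <;> cases l
  all_goals simp [pvCost]
  all_goals omega

-- closed-form bound on pvCost, used as the cheap fuel of the B port
lemma pv_cost_le (e fA : Nat) : ∀ l, pvCost e fA l ≤ (l + 1) * (e + 2) ^ fA := by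
  induction fA with
  | zero =>
    intro l
    induction l with
    | zero => simp [pvCost]
    | succ l ihl => simp [pvCost] at ihl ⊢; omega
  | succ fA ihfA =>
    intro l
    induction l with
    | zero =>
      have h3 : 1 ≤ (e + 2) ^ (fA + 1) := Nat.one_le_pow _ _ (by omega)
      simp [pvCost]; omega
    | succ l ihl =>
      have h1 : pvCost e fA e ≤ (e + 1) * (e + 2) ^ fA := ihfA e
      have h3 : 1 ≤ (e + 2) ^ fA := Nat.one_le_pow _ _ (by omega)
      have h4 : (e + 2) ^ (fA + 1) = (e + 2) ^ fA * (e + 2) := pow_succ _ _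
      simp only [pvCost]
      nlinarith [ihl]

-- MAIN SIMULATION: running B's loop on a frame (gid, ms) consumes some k steps
-- bounded by pvCost, restores the visited set (minus gid), and adds exactly the
-- set A's member fold computes; seen is A's set, vis B's, equal as sets.
lemma pv_loop_sim (fuelA : Nat) (gm : List (String × List String)) :
    ∀ (ms acc seen vis L : PySem.Set String) (gid : String)
      (rest : List (String × List String)),
      acc.Nodup → (∀ x, x ∈ vis ↔ x ∈ seen) → pvKeysLeft gm vis ≤ fuelA →
      ∃ k, k ≤ pvCost ((gm.map (fun p => p.2.length)).sum) fuelA ms.length ∧ ∀ f,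
        pvLoopB gm (k + f) ((gid, ms) :: rest) vis (PySem.Set.union L acc) =
        pvLoopB gm f rest (PySem.Set.discard vis gid)
          (PySem.Set.union L (ms.foldl (fun leaves member =>
            if PySem.Dict.contains (PySem.Dict.mk gm) member then
              PySem.Set.union leaves (pvResolveA fuelA member gm seen)
            else PySem.Set.add leaves member) acc)) := by
  induction fuelA using Nat.strong_induction_on with
  | _ fuelA IH =>
  intro ms
  induction ms with
  | nil =>
    intro acc seen vis L gid rest hacc hmem hkeys
    refine ⟨1, pv_cost_pos _ _ _, ?_⟩
    intro f
    have h1 : 1 + f = f + 1 := by omega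
    rw [h1]
    simp only [pvLoopB, List.foldl_nil]
  | cons m ms ihms =>
    intro acc seen vis L gid rest hacc hmem hkeys
    by_cases hkey : PySem.Dict.contains (PySem.Dict.mk gm) m = true
    · by_cases hvm : m ∈ vis
      · -- already-visited nested group: B skips, A's recursive call returns the empty set
        have hvt : PySem.Set.contains vis m = true := (PySem.Set.contains_iff _ _).mpr hvm
        have hst : PySem.Set.contains seen m = true :=
          (PySem.Set.contains_iff _ _).mpr ((hmem m).mp hvm)
        have hR : pvResolveA fuelA m gm seen = PySem.Set.empty := by
          cases fuelA with
          | zero => rfl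
          | succ fA => rw [pvResolveA, if_pos hst]
        obtain ⟨k', hk', hrun⟩ := ihms acc seen vis L gid rest hacc hmem hkeys
        refine ⟨k' + 1, ?_, ?_⟩
        · cases fuelA <;> simp [pvCost] <;> omega
        · intro f
          have h1 : k' + 1 + f = (k' + f) + 1 := by omega
          rw [h1]
          simp only [pvLoopB, hkey, hvt, Bool.not_true, Bool.false_eq_true, if_false,
            List.foldl_cons, hR]
          exact hrun f
      · -- unvisited nested group: B pushes a frame, A recurses
        have hvf : PySem.Set.contains vis m = false :=
          Bool.eq_false_iff.mpr (fun hc => hvm ((PySem.Set.contains_iff _ _).mp hc))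
        have hsf : PySem.Set.contains seen m = false :=
          Bool.eq_false_iff.mpr (fun hc => hvm ((hmem m).mpr ((PySem.Set.contains_iff _ _).mp hc)))
        have hdec := pv_keysLeft_lt gm vis m hkey hvm
        obtain ⟨fA, rfl⟩ : ∃ fA, fuelA = fA + 1 := ⟨fuelA - 1, by omega⟩
        have hkeys' : pvKeysLeft gm (PySem.Set.add vis m) ≤ fA := by omega
        have hmem' : ∀ x, x ∈ PySem.Set.add vis m ↔
            x ∈ PySem.Set.union seen (PySem.Set.ofList [m]) := by
          intro x
          rw [PySem.Set.mem_add, PySem.Set.mem_union, PySem.Set.mem_ofList, hmem x]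
          simp
        obtain ⟨kc, hkc, hrunc⟩ := IH fA (by omega)
          (PySem.Dict.getD (PySem.Dict.mk gm) m []) PySem.Set.empty
          (PySem.Set.union seen (PySem.Set.ofList [m])) (PySem.Set.add vis m)
          (PySem.Set.union L acc) m ((gid, ms) :: rest) List.nodup_nil hmem' hkeys'
        obtain ⟨k', hk', hrun'⟩ := ihms
          (PySem.Set.union acc (pvResolveA (fA + 1) m gm seen)) seen vis L gid rest
          (PySem.Set.nodup_union _ _ hacc) hmem hkeys
        refine ⟨1 + kc + k', ?_, ?_⟩
        · have hlen := pv_getD_len_le gm m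
          have hmono := pv_cost_mono ((gm.map (fun p => p.2.length)).sum) fA hlen
          simp only [pvCost, List.length_cons]
          omega
        · intro f
          have h2 : 1 + kc + k' + f = (kc + (k' + f)) + 1 := by omega
          rw [h2]
          simp only [pvLoopB, hkey, hvf, Bool.not_true, Bool.not_false, Bool.false_eq_true,
            if_false, if_true, List.foldl_cons]
          have hre : PySem.Set.union (PySem.Set.union L acc) PySem.Set.empty =
              PySem.Set.union L acc := rfl
          have hc := hrunc (k' + f)
          rw [hre, pv_discard_add vis m hvm] at hc
          have hres : pvResolveA (fA + 1) m gm seen =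
              (PySem.Dict.getD (PySem.Dict.mk gm) m []).foldl
                (fun leaves member =>
                  if PySem.Dict.contains (PySem.Dict.mk gm) member then
                    PySem.Set.union leaves
                      (pvResolveA fA member gm (PySem.Set.union seen (PySem.Set.ofList [m])))
                  else PySem.Set.add leaves member) PySem.Set.empty := by
            have hns : m ∉ seen := fun h => hvm ((hmem m).mpr h)
            rw [pvResolveA, if_neg (by simp [hns])]
          rw [← hres] at hc
          rw [hc, pv_union_assoc]
          exact hrun' f
    · -- leaf member
      have hkf : PySem.Dict.contains (PySem.Dict.mk gm) m = false := Bool.eq_false_iff.mpr hkey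
      obtain ⟨k', hk', hrun⟩ := ihms (PySem.Set.add acc m) seen vis L gid rest
        (PySem.Set.nodup_add _ _ hacc) hmem hkeys
      refine ⟨k' + 1, ?_, ?_⟩
      · cases fuelA <;> simp [pvCost] <;> omega
      · intro f
        have h1 : k' + 1 + f = (k' + f) + 1 := by omega
        rw [h1]
        simp only [pvLoopB, hkf, Bool.not_false, if_true, List.foldl_cons,
          Bool.false_eq_true, if_false]
        rw [← pv_union_add]
        exact hrun f

-- top-level: A's recursive call equals B's guarded stack loop, for any pair of
-- initial seen/visited sets with the same members
lemma pv_top (gm : List (String × List String)) (gid : String) (seen0 vis0 : PySem.Set String)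
    (hmem : ∀ x, x ∈ vis0 ↔ x ∈ seen0) :
    pvResolveA (gm.length + 2) gid gm seen0 =
    (if PySem.Set.contains vis0 gid then PySem.Set.empty
     else pvLoopB gm (((gm.map (fun p => p.2.length)).sum + 2) ^ (gm.length + 2))
       [(gid, PySem.Dict.getD (PySem.Dict.mk gm) gid [])]
       (PySem.Set.add vis0 gid) PySem.Set.empty) := by
  by_cases hg : gid ∈ vis0
  · have hvt : PySem.Set.contains vis0 gid = true := (PySem.Set.contains_iff _ _).mpr hg
    have hst : PySem.Set.contains seen0 gid = true :=
      (PySem.Set.contains_iff _ _).mpr ((hmem gid).mp hg)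
    rw [if_pos hvt, pvResolveA, if_pos hst]
  · have hvf : PySem.Set.contains vis0 gid = false :=
      Bool.eq_false_iff.mpr (fun hc => hg ((PySem.Set.contains_iff _ _).mp hc))
    have hns : gid ∉ seen0 := fun h => hg ((hmem gid).mpr h)
    have hsf : PySem.Set.contains seen0 gid = false :=
      Bool.eq_false_iff.mpr (fun hc => hns ((PySem.Set.contains_iff _ _).mp hc))
    rw [if_neg (by simp [hg])]
    have hmem' : ∀ x, x ∈ PySem.Set.add vis0 gid ↔
        x ∈ PySem.Set.union seen0 (PySem.Set.ofList [gid]) := by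
      intro x
      rw [PySem.Set.mem_add, PySem.Set.mem_union, PySem.Set.mem_ofList, hmem x]
      simp
    have hkeys : pvKeysLeft gm (PySem.Set.add vis0 gid) ≤ gm.length + 1 :=
      le_trans (pv_keysLeft_le gm _) (by omega)
    obtain ⟨k, hk, hrun⟩ := pv_loop_sim (gm.length + 1) gm
      (PySem.Dict.getD (PySem.Dict.mk gm) gid []) PySem.Set.empty
      (PySem.Set.union seen0 (PySem.Set.ofList [gid])) (PySem.Set.add vis0 gid)
      PySem.Set.empty gid [] List.nodup_nil hmem' hkeys
    have hF : k ≤ ((gm.map (fun p => p.2.length)).sum + 2) ^ (gm.length + 2) := by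
      set e := (gm.map (fun p => p.2.length)).sum with he
      have h1 : k ≤ pvCost e (gm.length + 1) e :=
        le_trans hk (pv_cost_mono _ _ (pv_getD_len_le gm gid))
      have h2 := pv_cost_le e (gm.length + 1) e
      have h3 : (e + 1) * (e + 2) ^ (gm.length + 1) ≤ (e + 2) ^ (gm.length + 2) := by
        have hx : 1 ≤ (e + 2) ^ (gm.length + 1) := Nat.one_le_pow _ _ (by omega)
        have hp : (e + 2) ^ (gm.length + 2) = (e + 2) ^ (gm.length + 1) * (e + 2) :=
          pow_succ _ _
        rw [hp]
        nlinarith [hx]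
      omega
    have hsplit := (Nat.add_sub_cancel' hF).symm
    rw [hsplit]
    have h0 : PySem.Set.union PySem.Set.empty PySem.Set.empty =
        (PySem.Set.empty : PySem.Set String) := rfl
    rw [← h0, hrun _, pv_loopB_nil]
    have hA : pvResolveA (gm.length + 2) gid gm seen0 =
        (PySem.Dict.getD (PySem.Dict.mk gm) gid []).foldl
          (fun leaves member =>
            if PySem.Dict.contains (PySem.Dict.mk gm) member then
              PySem.Set.union leaves
                (pvResolveA (gm.length + 1) member gm
                  (PySem.Set.union seen0 (PySem.Set.ofList [gid])))
            else PySem.Set.add leaves member) PySem.Set.empty := by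
      rw [pvResolveA, if_neg (by simp [hns])]
    rw [hA]
    have hun : ∀ t : List String, PySem.Set.union PySem.Set.empty t = PySem.Set.ofList t :=
      fun t => rfl
    rw [hun, PySem.Set.ofList_eq_self_of_nodup _
      (pv_nodup_fold _ _ _ _ (by simp [PySem.Set.empty]))]

-- ===== VERDICT (by name: the statement is the Claim_ definition above) =====
theorem resolve_group_members_py_spec : Claim_equal_resolve_group_members_py := by
  intro group_id group_map _seen _
  show resolve_group_members_py group_id group_map _seen =
    resolve_group_members_py_alt group_id group_map _seen
  cases _seen with
  | none =>
    have h := pv_top group_map group_id PySem.Set.empty PySem.Set.empty (fun x => Iff.rfl)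
    simpa only [resolve_group_members_py, resolve_group_members_py_alt] using h
  | some s =>
    have h := pv_top group_map group_id s (PySem.Set.ofList s) (fun x => PySem.Set.mem_ofList s x)
    simpa only [resolve_group_members_py, resolve_group_members_py_alt] using h
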